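-- pv_equiv track=rewrite | github.com/2SOOY/problem-solving | boj_암호만들기.py | solution
-- ===== SOURCE A (Python) =====
-- vowel = 'aeiou'
--
-- def solution(N, alphabets):
--     answer = []
--     alphabets.sort() # 암호는 알파벳순으로 정렬
--     check = [False] * len(alphabets) # 알파벳 선택 배열
--
--     def dfs(count, start, result):
--         if count == N:
--             v_count = 0
--             c_count = 0
--
--             # 모음, 자음 개수 카운트
--             for alpha in result:
--                 if alpha in vowel:
--                     v_count += 1
--                 else:
--                     c_count += 1
--
--             # 조건 만족시 => 비밀번호 가능
--             if v_count >= 1 and c_count >= 2: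
--                 answer.append(result)
--
--             return
--
--         # 조합 logic
--         for i in range(start, len(alphabets)):
--             if check[i]:
--                 continue
--
--             check[i] = True
--             dfs(count + 1, i + 1, result + alphabets[i])
--             check[i] = False
--
--     dfs(0, 0, '')
--     return answer
-- ===== SOURCE B (Python) =====
-- vowel = 'aeiou'
--
-- def combos(k, items):
--     # all k-element subsequences of items, joined, in lexicographic index order
--     if k == 0:
--         return ['']
--     if len(items) < k:
--         return []
--     head, rest = items[0], items[1:]
--     return [head + tail for tail in combos(k - 1, rest)] + combos(k, rest)
--
-- def solution(N, alphabets):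
--     alphabets.sort()
--     if N < 0:
--         return []
--     return [pw for pw in combos(N, alphabets)
--             if sum(ch in vowel for ch in pw) >= 1
--             and sum(ch not in vowel for ch in pw) >= 2]
-- ===== Notes on version B (the rewrite author's own statement) =====
-- stated objective: simpler
-- what changed: Replaces the index-based DFS with a mutable check array, start index and in-place answer accumulation by a pure take/skip recursion that returns all N-element combinations, followed by a single filtering comprehension.
import Mathlib
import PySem

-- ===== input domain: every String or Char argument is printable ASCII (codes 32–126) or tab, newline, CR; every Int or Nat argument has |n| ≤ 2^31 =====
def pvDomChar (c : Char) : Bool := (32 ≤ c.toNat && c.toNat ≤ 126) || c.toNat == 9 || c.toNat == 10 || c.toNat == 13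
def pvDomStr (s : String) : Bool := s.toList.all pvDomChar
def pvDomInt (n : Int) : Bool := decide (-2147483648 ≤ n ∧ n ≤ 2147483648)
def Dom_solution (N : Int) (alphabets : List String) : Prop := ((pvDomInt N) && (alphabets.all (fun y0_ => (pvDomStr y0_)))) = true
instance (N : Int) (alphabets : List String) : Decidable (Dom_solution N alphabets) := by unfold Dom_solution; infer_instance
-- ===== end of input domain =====

set_option maxHeartbeats 1000000


-- B replaces A's index-DFS with backtracking check array by a pure take/skip recursion producing all
-- combinations, then a filter; same return value. Both A and B sort the `alphabets` argument in place
-- (the equivalence proved here is about the return value; B performs the same in-place sort).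

-- ===== PORT A =====
-- vowel = 'aeiou'
def pvVowel : List Char := ['a', 'e', 'i', 'o', 'u']

-- the v_count / c_count loop at the leaf of dfs
def pvCountVC (result : String) : Int × Int :=
  result.toList.foldl
    (fun (vc : Int × Int) alpha =>
      if pvVowel.contains alpha then (vc.1 + 1, vc.2) else (vc.1, vc.2 + 1))
    (0, 0)

mutual
-- dfs(count, start, result); `answer` and `check` are the closed-over mutable state
def dfsA (N : Int) (alpha : List String) (count : Int) (start : Nat) (result : String)
    (answer : List String) (check : List Bool) : List String × List Bool :=
  if count = N then
    (let vc := pvCountVC result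
     if 1 ≤ vc.1 ∧ 2 ≤ vc.2 then answer ++ [result] else answer, check)
  else loopA N alpha count start start (Nat.le_refl start) result answer check
termination_by (alpha.length + 1 - start, alpha.length + 2)

-- the `for i in range(start, len(alphabets))` loop inside dfs (hsi is only for termination)
def loopA (N : Int) (alpha : List String) (count : Int) (start i : Nat) (hsi : start ≤ i)
    (result : String) (answer : List String) (check : List Bool) : List String × List Bool :=
  if h : i < alpha.length then
    if check.getD i false then
      loopA N alpha count start (i + 1) (Nat.le_succ_of_le hsi) result answer check
    else
      let r := dfsA N alpha (count + 1) (i + 1) (result ++ alpha[i]) answer (check.set i true)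
      loopA N alpha count start (i + 1) (Nat.le_succ_of_le hsi) result r.1 (r.2.set i false)
  else (answer, check)
termination_by (alpha.length + 1 - start, alpha.length + 1 - i)
end

def solution (N : Int) (alphabets : List String) : List String :=
  (dfsA N (PySem.List.sorted alphabets (fun s => s)) 0 0 "" []
    (List.replicate (PySem.List.sorted alphabets (fun s => s)).length false)).1

-- ===== PORT B =====
-- the filter condition of B's list comprehension
def pvGood (pw : String) : Bool :=
  decide (1 ≤ pw.toList.countP (fun ch => pvVowel.contains ch)) &&
  decide (2 ≤ pw.toList.countP (fun ch => !(pvVowel.contains ch)))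

-- combos(k, items): all k-element subsequences of items, joined, in index order
def combosB (k : Int) (items : List String) : List String :=
  if k = 0 then [""]
  else if (items.length : Int) < k then []
  else
    match items with
    | [] => []  -- unreachable for k ≥ 0 (and B only calls combos with k ≥ 0)
    | head :: rest => (combosB (k - 1) rest).map (fun tail => head ++ tail) ++ combosB k rest

def solution_alt (N : Int) (alphabets : List String) : List String :=
  if N < 0 then []
  else (combosB N (PySem.List.sorted alphabets (fun s => s))).filter pvGood

-- ===== PRECONDITION & SPEC =====
def Spec_solution (N : Int) (alphabets : List String) (out : List String) : Prop := out = solution_alt N alphabets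
instance (N : Int) (alphabets : List String) (out : List String) : Decidable (Spec_solution N alphabets out) := by unfold Spec_solution; infer_instance

-- ===== CLAIM (what is proved, stated in full; the proofs are below) =====
def Claim_equal_solution : Prop := ∀ (N : Int) (alphabets : List String), Dom_solution N alphabets → Spec_solution N alphabets (solution N alphabets)

-- ===== LEMMAS AND PROOFS =====

lemma combosB_zero (items : List String) : combosB 0 items = [""] := by
  unfold combosB; simp

lemma combosB_nil (k : Int) (hk : k ≠ 0) : combosB k [] = [] := by
  unfold combosB; simp [hk]

lemma combosB_of_lt (k : Int) (items : List String) (h : (items.length : Int) < k) :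
    combosB k items = [] := by
  have h0 : (0 : Int) ≤ (items.length : Int) := Int.natCast_nonneg _
  have hk : ¬ k = 0 := by omega
  unfold combosB; simp [hk, h]

lemma combosB_neg (k : Int) (items : List String) (h : k < 0) : combosB k items = [] := by
  induction items generalizing k with
  | nil => exact combosB_nil k (by omega)
  | cons a rest ih =>
    have hk : ¬ k = 0 := by omega
    have h2 : ¬ (((a :: rest).length : Int) < k) := by
      have h0 : (0 : Int) ≤ (((a :: rest).length : Nat) : Int) := Int.natCast_nonneg _
      omega
    rw [combosB, if_neg hk, if_neg h2]
    simp [ih (k - 1) (by omega), ih k h]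

lemma combosB_cons (k : Int) (a : String) (rest : List String) (hk : k ≠ 0) :
    combosB k (a :: rest) = (combosB (k - 1) rest).map (fun tail => a ++ tail) ++ combosB k rest := by
  by_cases hlt : (((a :: rest).length : Int) < k)
  · rw [combosB_of_lt _ _ hlt,
      combosB_of_lt (k - 1) rest (by simp at hlt ⊢; omega),
      combosB_of_lt k rest (by simp at hlt ⊢; omega)]
    simp
  · rw [combosB, if_neg hk, if_neg hlt]

lemma foldl_vc (l : List Char) (v c : Int) :
    l.foldl
      (fun (vc : Int × Int) alpha =>
        if pvVowel.contains alpha then (vc.1 + 1, vc.2) else (vc.1, vc.2 + 1))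
      (v, c)
    = (v + (l.countP (fun ch => pvVowel.contains ch) : Int),
       c + (l.countP (fun ch => !(pvVowel.contains ch)) : Int)) := by
  induction l generalizing v c with
  | nil => simp
  | cons ch t ih =>
    rw [List.foldl_cons]
    by_cases h : ch ∈ pvVowel
    · rw [if_pos (by simp [h]), ih, List.countP_cons, List.countP_cons]
      simp [h, Prod.ext_iff]; omega
    · rw [if_neg (by simp [h]), ih, List.countP_cons, List.countP_cons]
      simp [h, Prod.ext_iff]; omega

lemma pvCountVC_eq (result : String) :
    pvCountVC result =
      ((result.toList.countP (fun ch => pvVowel.contains ch) : Int),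
       (result.toList.countP (fun ch => !(pvVowel.contains ch)) : Int)) := by
  unfold pvCountVC; rw [foldl_vc]; simp

lemma leaf_eq_good (result : String) :
    (if 1 ≤ (pvCountVC result).1 ∧ 2 ≤ (pvCountVC result).2 then [result] else []) =
      [result].filter pvGood := by
  rw [pvCountVC_eq]
  dsimp only
  simp only [pvGood, List.filter_cons, List.filter_nil]
  exact if_congr (by simp only [Bool.and_eq_true, decide_eq_true_eq]; omega) rfl rfl

lemma getD_set_false (check : List Bool) (i : Nat) (hi : i < check.length)
    (hv : check.getD i false = false) : check.set i false = check := by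
  apply List.ext_getElem?
  intro j
  by_cases hj : i = j
  · subst hj
    rw [List.getElem?_set_self (by omega), List.getElem?_eq_getElem hi]
    rw [List.getD_eq_getElem?_getD, List.getElem?_eq_getElem hi] at hv
    simp_all
  · rw [List.getElem?_set_ne hj]

mutual
lemma dfsA_eq (N : Int) (alpha : List String) (count : Int) (start : Nat) (result : String)
    (answer : List String) (check : List Bool)
    (hlen : check.length = alpha.length)
    (hinv : ∀ j, start ≤ j → check.getD j false = false) :
    dfsA N alpha count start result answer check =
      (answer ++ ((combosB (N - count) (alpha.drop start)).map (fun t => result ++ t)).filter pvGood,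
       check) := by
  rw [dfsA]
  by_cases hc : count = N
  · subst hc
    have h1 : (if 1 ≤ (pvCountVC result).1 ∧ 2 ≤ (pvCountVC result).2
        then answer ++ [result] else answer)
        = answer ++ (if 1 ≤ (pvCountVC result).1 ∧ 2 ≤ (pvCountVC result).2
            then [result] else []) := by split <;> simp
    simp only [if_true, Int.sub_self, combosB_zero, List.map_cons,
      List.map_nil, String.append_empty, h1, leaf_eq_good]
  · rw [if_neg hc]
    exact loopA_eq N alpha count start start (Nat.le_refl start) result answer check hc hlen hinv
termination_by (alpha.length + 1 - start, alpha.length + 2)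

lemma loopA_eq (N : Int) (alpha : List String) (count : Int) (start i : Nat) (hsi : start ≤ i)
    (result : String) (answer : List String) (check : List Bool)
    (hne : ¬ count = N)
    (hlen : check.length = alpha.length)
    (hinv : ∀ j, i ≤ j → check.getD j false = false) :
    loopA N alpha count start i hsi result answer check =
      (answer ++ ((combosB (N - count) (alpha.drop i)).map (fun t => result ++ t)).filter pvGood,
       check) := by
  rw [loopA]
  by_cases h : i < alpha.length
  · have hci : check.getD i false = false := hinv i (Nat.le_refl i)
    rw [dif_pos h, if_neg (by rw [hci]; simp)]
    have hrec := dfsA_eq N alpha (count + 1) (i + 1) (result ++ alpha[i]) answer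
      (check.set i true) (by simp [hlen])
      (by
        intro j hj
        rw [List.getD_eq_getElem?_getD, List.getElem?_set_ne (by omega),
          ← List.getD_eq_getElem?_getD]
        exact hinv j (by omega))
    simp only [hrec, List.set_set]
    rw [getD_set_false check i (by omega) hci]
    rw [loopA_eq N alpha count start (i + 1) (Nat.le_succ_of_le hsi) result _ check hne hlen
      (fun j hj => hinv j (by omega))]
    rw [List.drop_eq_getElem_cons h, combosB_cons _ _ _ (by omega)]
    have hsub : N - (count + 1) = N - count - 1 := by ring
    simp only [hsub, List.map_append, List.filter_append, List.map_map, List.append_assoc]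
    have hcomp : ((fun t => result ++ t) ∘ fun tail => alpha[i] ++ tail)
        = (fun t => result ++ alpha[i] ++ t) := by
      funext t; simp [Function.comp, String.append_assoc]
    rw [hcomp]
  · rw [dif_neg h]
    rw [List.drop_eq_nil_of_le (by omega), combosB_nil (N - count) (by omega)]
    simp
termination_by (alpha.length + 1 - start, alpha.length + 1 - i)
end

-- ===== VERDICT (by name: the statement is the Claim_ definition above) =====
theorem solution_spec : Claim_equal_solution := by
  intro N alphabets _
  unfold Spec_solution solution solution_alt
  rw [dfsA_eq N _ 0 0 "" [] _ (by simp)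
    (by
      intro j _
      rw [List.getD_eq_getElem?_getD, List.getElem?_replicate]
      split <;> rfl)]
  simp only [List.drop_zero, Int.sub_zero, List.nil_append, String.empty_append, List.map_id']
  by_cases hN : N < 0
  · simp [hN, combosB_neg N _ hN]
  · simp [hN]
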